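-- pv_equiv track=rewrite | github.com/cybershaman666/jobshaman.cz | backend/app/utils/request_urls.py | _parse_forwarded_header
-- ===== SOURCE A (Python) =====
-- def _parse_forwarded_header(raw: str | None) -> tuple[str | None, str | None]:
--     if not raw:
--         return None, None
--     first = raw.split(",", 1)[0]
--     proto: str | None = None
--     host: str | None = None
--     for item in first.split(";"):
--         key, _, value = item.strip().partition("=")
--         if not key or not value:
--             continue
--         normalized_key = key.strip().lower()
--         normalized_value = value.strip().strip('"').strip("'")
--         if normalized_key == "proto" and normalized_value:
--             proto = normalized_value
--         elif normalized_key == "host" and normalized_value: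
--             host = normalized_value
--     return proto, host
-- ===== SOURCE B (Python) =====
-- def _parse_forwarded_header(raw):
--     if not raw:
--         return None, None
--     # Pass 1: parse the first comma-element into a list of normalized (key, value) pairs.
--     pairs = []
--     for item in raw.split(",", 1)[0].split(";"):
--         key, _, value = item.strip().partition("=")
--         if key and value:
--             pairs.append((key.strip().lower(), value.strip().strip('"').strip("'")))
--
--     # Pass 2: for each wanted key, scan the pairs BACK-TO-FRONT for the first
--     # non-empty value (== the last non-empty occurrence, i.e. A's overwrite rule).
--     def last(wanted):
--         for k, v in reversed(pairs):
--             if k == wanted and v: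
--                 return v
--         return None
--
--     return last("proto"), last("host")
-- ===== Notes on version B (the rewrite author's own statement) =====
-- stated objective: alternative
-- what changed: Replaces A's stateful single pass (two mutable slots updated by an in-loop if/elif) with two stages: first parse all items into a list of normalized (key, value) pairs, then answer each of the two keys by a back-to-front search of that list for the first non-empty value (last-non-empty-wins, matching A's overwrite rule).
import Mathlib
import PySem

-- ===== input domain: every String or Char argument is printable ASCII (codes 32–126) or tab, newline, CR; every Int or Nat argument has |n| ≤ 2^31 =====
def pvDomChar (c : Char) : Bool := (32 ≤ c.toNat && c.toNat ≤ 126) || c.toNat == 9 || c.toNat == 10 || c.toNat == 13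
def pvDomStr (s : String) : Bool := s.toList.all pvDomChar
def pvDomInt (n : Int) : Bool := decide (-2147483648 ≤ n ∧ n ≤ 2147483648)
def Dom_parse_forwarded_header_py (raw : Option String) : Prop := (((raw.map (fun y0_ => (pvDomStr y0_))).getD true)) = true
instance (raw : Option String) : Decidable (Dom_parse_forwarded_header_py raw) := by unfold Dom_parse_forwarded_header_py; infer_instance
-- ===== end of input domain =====

-- B replaces A's stateful single pass (two mutable slots updated by if/elif) with two stages:
-- parse all items into normalized (key, value) pairs, then answer each of the two keys by a
-- back-to-front search for the first non-empty value (simpler decomposition, same cost).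

-- s.partition(sep) for sep ≠ "": exact via split with maxsplit 1 ((before, after-first-sep), or (s, "") when sep is absent)
def pyPartition (s sep : String) : String × String :=
  match PySem.Str.splitMax? s sep 1 with
  | some [a, b] => (a, b)
  | _ => (s, "")

-- value.strip().strip('"').strip("'")
def normVal (v : String) : String :=
  PySem.Str.stripChars (PySem.Str.stripChars (PySem.Str.strip v) "\"") "'"

-- ===== PORT A =====
-- loop body of A: key, _, value = item.strip().partition("="); skip empty; update proto/host
def stepA (st : Option String × Option String) (item : String) : Option String × Option String :=
  if (pyPartition (PySem.Str.strip item) "=").1 = "" ∨ (pyPartition (PySem.Str.strip item) "=").2 = "" then st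
  else if PySem.Str.lower (PySem.Str.strip (pyPartition (PySem.Str.strip item) "=").1) = "proto" ∧ normVal (pyPartition (PySem.Str.strip item) "=").2 ≠ "" then (some (normVal (pyPartition (PySem.Str.strip item) "=").2), st.2)
  else if PySem.Str.lower (PySem.Str.strip (pyPartition (PySem.Str.strip item) "=").1) = "host" ∧ normVal (pyPartition (PySem.Str.strip item) "=").2 ≠ "" then (st.1, some (normVal (pyPartition (PySem.Str.strip item) "=").2))
  else st

def parse_forwarded_header_py (raw : Option String) : Option String × Option String :=
  match raw with
  | none => (none, none)
  | some s =>
    if s = "" then (none, none)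
    else
      ((PySem.Str.split? (((PySem.Str.splitMax? s "," 1).getD [s]).headD s) ";").getD []).foldl stepA (none, none)

-- ===== PORT B =====
-- pass-1 loop body of B: if key and value: pairs.append((normalized key, normalized value))
def stepB (acc : List (String × String)) (item : String) : List (String × String) :=
  if (pyPartition (PySem.Str.strip item) "=").1 = "" ∨ (pyPartition (PySem.Str.strip item) "=").2 = "" then acc
  else acc ++ [(PySem.Str.lower (PySem.Str.strip (pyPartition (PySem.Str.strip item) "=").1), normVal (pyPartition (PySem.Str.strip item) "=").2)]

-- B's `last(wanted)`: first match with non-empty value in the reversed pair list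
def lastB (pairs : List (String × String)) (wanted : String) : Option String :=
  (pairs.reverse.find? (fun p => p.1 == wanted && p.2 != "")).map Prod.snd

def parse_forwarded_header_py_alt (raw : Option String) : Option String × Option String :=
  match raw with
  | none => (none, none)
  | some s =>
    if s = "" then (none, none)
    else
      (lastB (((PySem.Str.split? (((PySem.Str.splitMax? s "," 1).getD [s]).headD s) ";").getD []).foldl stepB []) "proto",
       lastB (((PySem.Str.split? (((PySem.Str.splitMax? s "," 1).getD [s]).headD s) ";").getD []).foldl stepB []) "host")

-- ===== PRECONDITION & SPEC =====
def Spec_parse_forwarded_header_py (raw : Option String) (out : Option String × Option String) : Prop := out = parse_forwarded_header_py_alt raw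
instance (raw : Option String) (out : Option String × Option String) : Decidable (Spec_parse_forwarded_header_py raw out) := by unfold Spec_parse_forwarded_header_py; infer_instance

-- ===== CLAIM (what is proved, stated in full; the proofs are below) =====
def Claim_equal_parse_forwarded_header_py : Prop := ∀ (raw : Option String), Dom_parse_forwarded_header_py raw → Spec_parse_forwarded_header_py raw (parse_forwarded_header_py raw)

-- ===== LEMMAS AND PROOFS =====

-- first-some choice (eager Option.orElse); associativity is by cases
def ob (o d : Option String) : Option String := match o with | some v => some v | none => d

lemma ob_assoc (a b c : Option String) : ob (ob a b) c = ob a (ob b c) := by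
  cases a <;> rfl

lemma ob_none_right (a : Option String) : ob a none = a := by cases a <;> rfl

-- the single item's contribution to key k
def contrib (item : String) (k : String) : Option String :=
  if (pyPartition (PySem.Str.strip item) "=").1 = "" ∨ (pyPartition (PySem.Str.strip item) "=").2 = "" then none
  else if PySem.Str.lower (PySem.Str.strip (pyPartition (PySem.Str.strip item) "=").1) = k ∧ normVal (pyPartition (PySem.Str.strip item) "=").2 ≠ "" then some (normVal (pyPartition (PySem.Str.strip item) "=").2) else none

-- B's pass 1 appends, so its fold distributes over the accumulator
lemma stepB_fold_append (items : List String) (acc : List (String × String)) :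
    items.foldl stepB acc = acc ++ items.foldl stepB [] := by
  induction items generalizing acc with
  | nil => simp
  | cons a l ih =>
      simp only [List.foldl_cons]
      rw [ih (stepB acc a), ih (stepB [] a)]
      unfold stepB
      split_ifs <;> simp

-- B's search after prepending one pair: the pair is consulted only if the rest has no match
lemma lastB_cons_pair (p : String × String) (L : List (String × String)) (k : String) :
    lastB (p :: L) k = ob (lastB L k) (if p.1 = k ∧ p.2 ≠ "" then some p.2 else none) := by
  unfold lastB
  rw [List.reverse_cons, List.find?_append]
  cases hf : L.reverse.find? (fun q => q.1 == k && q.2 != "") with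
  | some v => simp [ob]
  | none =>
      obtain ⟨x, y⟩ := p
      simp only [Option.none_or, ob]
      by_cases hk : x = k
      · have hb : (x == k) = true := beq_iff_eq.mpr hk
        by_cases hv : y = ""
        · simp [List.find?, hv, hk]
        · have hv' : (y != "") = true := by simp [hv]
          simp [List.find?, hv', hk, hv]
      · have hb : (x == k) = false := beq_eq_false_iff_ne.mpr hk
        simp [List.find?, hb, hk]

-- B's back-to-front search, peeling one leading item off pass 1's output
lemma lastB_cons (a : String) (l : List String) (k : String) :
    lastB ((a :: l).foldl stepB []) k = ob (lastB (l.foldl stepB []) k) (contrib a k) := by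
  rw [List.foldl_cons, stepB_fold_append l (stepB [] a)]
  by_cases h1 : (pyPartition (PySem.Str.strip a) "=").1 = "" ∨ (pyPartition (PySem.Str.strip a) "=").2 = ""
  · have e : stepB [] a = [] := by simp [stepB, h1]
    have c : contrib a k = none := by simp [contrib, h1]
    rw [e, c, List.nil_append, ob_none_right]
  · have e : stepB [] a
        = [(PySem.Str.lower (PySem.Str.strip (pyPartition (PySem.Str.strip a) "=").1),
            normVal (pyPartition (PySem.Str.strip a) "=").2)] := by simp [stepB, h1]
    have c : contrib a k
        = (if PySem.Str.lower (PySem.Str.strip (pyPartition (PySem.Str.strip a) "=").1) = k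
              ∧ normVal (pyPartition (PySem.Str.strip a) "=").2 ≠ ""
           then some (normVal (pyPartition (PySem.Str.strip a) "=").2) else none) := by
      simp [contrib, h1]
    rw [e, c, List.singleton_append, lastB_cons_pair]

-- contrib is exactly what stepA does to each slot
lemma stepA_eq_contrib (st : Option String × Option String) (a : String) :
    stepA st a = (ob (contrib a "proto") st.1, ob (contrib a "host") st.2) := by
  obtain ⟨p, h⟩ := st
  unfold stepA contrib
  by_cases h1 : (pyPartition (PySem.Str.strip a) "=").1 = "" ∨ (pyPartition (PySem.Str.strip a) "=").2 = ""
  · simp [h1, ob]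
  · by_cases h2 : PySem.Str.lower (PySem.Str.strip (pyPartition (PySem.Str.strip a) "=").1) = "proto"
        ∧ normVal (pyPartition (PySem.Str.strip a) "=").2 ≠ ""
    · have hh : ¬(PySem.Str.lower (PySem.Str.strip (pyPartition (PySem.Str.strip a) "=").1) = "host"
          ∧ normVal (pyPartition (PySem.Str.strip a) "=").2 ≠ "") := by
        rintro ⟨hk, -⟩
        exact absurd (h2.1.symm.trans hk) (by decide)
      simp [h1, h2, ob]
    · by_cases h3 : PySem.Str.lower (PySem.Str.strip (pyPartition (PySem.Str.strip a) "=").1) = "host"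
          ∧ normVal (pyPartition (PySem.Str.strip a) "=").2 ≠ ""
      · simp [h1, h3, ob]
      · simp [h1, h2, h3, ob]

-- main invariant: A's fold equals B's two back-to-front searches over pass 1's pairs
lemma fold_eq (items : List String) (st : Option String × Option String) :
    items.foldl stepA st
      = (ob (lastB (items.foldl stepB []) "proto") st.1,
         ob (lastB (items.foldl stepB []) "host") st.2) := by
  induction items generalizing st with
  | nil => cases st; simp [lastB, ob]
  | cons a l ih =>
      rw [List.foldl_cons, ih (stepA st a), stepA_eq_contrib st a,
        lastB_cons a l "proto", lastB_cons a l "host"]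
      simp [ob_assoc]

-- ===== VERDICT (by name: the statement is the Claim_ definition above) =====
theorem parse_forwarded_header_py_spec : Claim_equal_parse_forwarded_header_py := by
  intro raw _
  show parse_forwarded_header_py raw = parse_forwarded_header_py_alt raw
  cases raw with
  | none => rfl
  | some s =>
      unfold parse_forwarded_header_py parse_forwarded_header_py_alt
      by_cases hs : s = ""
      · simp [hs]
      · simp only [hs, if_false]
        rw [fold_eq]
        simp [ob_none_right]
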